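-- pv_equiv track=rewrite | github.com/ph4r05/monero-agent | monero_glue/xmr/core/ec_base.py | decode_ed25519
-- ===== SOURCE A (Python) =====
-- def decode_ed25519(limbs):
--     """
--     Decodes hexcoded limbs with 25.5 radix to Zmod(2^255-19) integer
--
--     :param n:
--     :return:
--     """
--     n = 0
--     c = 0
--     shift = 0
--     bits = [26, 25, 26, 25, 26, 25, 26, 25, 26, 25]
--     for i in range(10):
--         n += ((limbs[i] & ((1 << bits[i]) - 1)) + c) << shift
--         c = limbs[i] >> bits[i]
--         shift += bits[i]
--     return n
-- ===== SOURCE B (Python) =====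
-- def decode_ed25519(limbs):
--     """
--     Decodes hexcoded limbs with 25.5 radix to Zmod(2^255-19) integer
--
--     :param n:
--     :return:
--     """
--     shifts = (0, 26, 51, 77, 102, 128, 153, 179, 204, 230)
--     return sum(limbs[i] << shifts[i] for i in range(9)) + ((limbs[9] & ((1 << 25) - 1)) << 230)
-- ===== Notes on version B (the rewrite author's own statement) =====
-- stated objective: simpler
-- what changed: Replaces the carry-propagating loop over (n, c, shift) state with a stateless one-liner: each of the first nine limbs is shifted directly to its precomputed cumulative bit offset and summed, plus the masked tenth limb at offset 230 (the identity x == (x & mask) + ((x >> k) << k) makes the two decompositions equal).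
import Mathlib
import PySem

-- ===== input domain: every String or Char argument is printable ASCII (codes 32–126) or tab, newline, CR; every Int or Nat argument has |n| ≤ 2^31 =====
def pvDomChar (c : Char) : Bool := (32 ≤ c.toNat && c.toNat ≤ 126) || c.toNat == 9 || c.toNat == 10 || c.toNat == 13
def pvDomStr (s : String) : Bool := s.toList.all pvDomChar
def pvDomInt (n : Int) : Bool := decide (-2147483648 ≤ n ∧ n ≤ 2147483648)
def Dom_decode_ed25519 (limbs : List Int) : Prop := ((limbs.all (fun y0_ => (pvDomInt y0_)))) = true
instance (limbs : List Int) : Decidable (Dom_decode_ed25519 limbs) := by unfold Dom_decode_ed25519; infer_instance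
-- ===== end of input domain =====

-- B drops A's running-carry state: each limb is shifted directly into its cumulative
-- bit position and summed in one pass (objective: simpler; equivalence of return values).

-- ===== PORT A =====
-- A: n = 0; c = 0; shift = 0; bits = [...]; for i in range(10): n += ((limbs[i] & mask) + c) << shift; c = limbs[i] >> bits[i]; shift += bits[i]
-- limbs[i] is ported as pyGetD with default 0: indices 0..9 are in range on Pre_ (len ≥ 10),
-- and outside Pre_ (where Python raises IndexError) nothing is claimed.
def decode_ed25519 (limbs : List Int) : Int :=
  let bits : List Nat := [26, 25, 26, 25, 26, 25, 26, 25, 26, 25]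
  let s := (PySem.List.pyRange 0 10 1).foldl
    (fun (st : Int × Int × Nat) i =>
      let bi := bits.getD i.toNat 0
      (st.1 + ((PySem.Int.band (PySem.List.pyGetD limbs i 0) ((1 <<< bi) - 1)) + st.2.1) <<< st.2.2,
       (PySem.List.pyGetD limbs i 0) >>> bi,
       st.2.2 + bi))
    (0, 0, 0)
  s.1

-- ===== PORT B =====
-- B: shifts = (0,26,...,230); sum(limbs[i] << shifts[i] for i in range(9)) + ((limbs[9] & ((1<<25)-1)) << 230)
def decode_ed25519_alt (limbs : List Int) : Int :=
  let shifts : List Nat := [0, 26, 51, 77, 102, 128, 153, 179, 204, 230]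
  (((PySem.List.pyRange 0 9 1).map
      (fun i => (PySem.List.pyGetD limbs i 0) <<< shifts.getD i.toNat 0)).sum)
    + (PySem.Int.band (PySem.List.pyGetD limbs 9 0) ((1 <<< (25:Nat)) - 1)) <<< (230:Nat)

-- ===== PRECONDITION & SPEC =====
-- Pre_: Python A raises IndexError when the list has fewer than 10 limbs; exactly those inputs are excluded.
def Pre_decode_ed25519 (limbs : List Int) : Prop := 10 ≤ limbs.length
instance (limbs : List Int) : Decidable (Pre_decode_ed25519 limbs) := by unfold Pre_decode_ed25519; infer_instance
def pvWitness_decode_ed25519 : List Int := [1, 2, 3, 4, 5, 6, 7, 8, 9, 10]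
def Spec_decode_ed25519 (limbs : List Int) (out : Int) : Prop := out = decode_ed25519_alt limbs
instance (limbs : List Int) (out : Int) : Decidable (Spec_decode_ed25519 limbs out) := by unfold Spec_decode_ed25519; infer_instance

-- ===== CLAIM (what is proved, stated in full; the proofs are below) =====
def Claim_equal_decode_ed25519 : Prop := ∀ (limbs : List Int), Dom_decode_ed25519 limbs → Pre_decode_ed25519 limbs → Spec_decode_ed25519 limbs (decode_ed25519 limbs)

-- ===== LEMMAS AND PROOFS =====

-- Python's  x & ((1 << k) - 1)  is the (always nonnegative) remainder  x % 2^k, also for negative x.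
lemma band_mask (x : Int) (k : Nat) : PySem.Int.band x (2 ^ k - 1) = x % 2 ^ k := by
  have hm : ((2:Int) ^ k - 1) = (((2 ^ k - 1 : Nat)) : Int) := by
    have : (1:Nat) ≤ 2 ^ k := Nat.one_le_two_pow
    push_cast [this]; ring
  rcases le_or_gt 0 x with hx | hx
  · rw [hm, PySem.Int.band_of_nonneg hx (by exact Int.natCast_nonneg _)]
    rw [Int.toNat_natCast, Nat.and_two_pow_sub_one_eq_mod, Int.natCast_mod]
    push_cast [Int.toNat_of_nonneg hx]
    rfl
  · have hmn : (0:Int) ≤ 2 ^ k - 1 := hm ▸ Int.natCast_nonneg _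
    have hneg : ¬ (0 ≤ x) := not_le.mpr hx
    unfold PySem.Int.band
    rw [if_neg hneg, if_pos hmn]
    set n : Nat := (-x - 1).toNat with hn
    have hxn : x = -(n : Int) - 1 := by
      have : ((-x - 1).toNat : Int) = -x - 1 := Int.toNat_of_nonneg (by omega)
      omega
    have hmt : ((2:Int)^k - 1).toNat = 2 ^ k - 1 := by
      rw [hm, Int.toNat_natCast]
    rw [hmt, Nat.and_comm, Nat.and_two_pow_sub_one_eq_mod]
    have hr : n % 2 ^ k < 2 ^ k := Nat.mod_lt _ (by positivity)
    have h1 : ((2 ^ k - 1 - n % 2 ^ k : Nat) : Int) = 2 ^ k - 1 - ((n % 2 ^ k : Nat) : Int) := by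
      have : (1:Nat) ≤ 2 ^ k := Nat.one_le_two_pow
      omega
    rw [h1]
    have hrI : ((n % 2 ^ k : Nat) : Int) < 2 ^ k := by exact_mod_cast hr
    have hrI0 : (0:Int) ≤ ((n % 2 ^ k : Nat) : Int) := Int.natCast_nonneg _
    have hx2 : x = (2 ^ k - 1 - ((n % 2^k : Nat):Int)) + (-((n / 2 ^ k : Nat):Int) - 1) * 2 ^ k := by
      have hq : ((n:Int)) = 2 ^ k * ((n / 2 ^ k : Nat):Int) + ((n % 2 ^ k : Nat):Int) := by
        exact_mod_cast (Nat.div_add_mod n (2^k)).symm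
      rw [hxn, hq]; ring
    rw [hx2, Int.add_mul_emod_self_right, Int.emod_eq_of_lt (by omega) (by omega)]

lemma band_mask26 (x : Int) : PySem.Int.band x 67108863 = x % 67108864 := by
  have h := band_mask x 26; norm_num at h; exact h

lemma band_mask25 (x : Int) : PySem.Int.band x 33554431 = x % 33554432 := by
  have h := band_mask x 25; norm_num at h; exact h

-- the two ports agree on any list with at least 10 limbs
lemma decode_ed25519_eq_alt_cons (a0 a1 a2 a3 a4 a5 a6 a7 a8 a9 : Int) (rest : List Int) :
    decode_ed25519 (a0::a1::a2::a3::a4::a5::a6::a7::a8::a9::rest)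
      = decode_ed25519_alt (a0::a1::a2::a3::a4::a5::a6::a7::a8::a9::rest) := by
  have hr10 : PySem.List.pyRange 0 10 1 = [0,1,2,3,4,5,6,7,8,9] := by decide
  have hr9 : PySem.List.pyRange 0 9 1 = [0,1,2,3,4,5,6,7,8] := by decide
  simp only [decode_ed25519, decode_ed25519_alt, hr10, hr9,
    List.foldl_cons, List.foldl_nil, List.map_cons, List.map_nil, List.sum_cons, List.sum_nil,
    Int.reduceToNat]
  norm_num [PySem.List.pyGetD_ofNat', band_mask26, band_mask25, Int.shiftLeft_eq, Int.shiftRight_eq_div_pow]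
  have h0 := Int.emod_add_ediv a0 67108864
  have h1 := Int.emod_add_ediv a1 33554432
  have h2 := Int.emod_add_ediv a2 67108864
  have h3 := Int.emod_add_ediv a3 33554432
  have h4 := Int.emod_add_ediv a4 67108864
  have h5 := Int.emod_add_ediv a5 33554432
  have h6 := Int.emod_add_ediv a6 67108864
  have h7 := Int.emod_add_ediv a7 33554432
  have h8 := Int.emod_add_ediv a8 67108864
  linear_combination h0 + 2^26*h1 + 2^51*h2 + 2^77*h3 + 2^102*h4 + 2^128*h5 + 2^153*h6 + 2^179*h7 + 2^204*h8

-- ===== VERDICT (by name: the statement is the Claim_ definition above) =====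
theorem decode_ed25519_spec : Claim_equal_decode_ed25519 := by
  intro limbs _ hpre
  unfold Spec_decode_ed25519
  rcases limbs with _|⟨a0,_|⟨a1,_|⟨a2,_|⟨a3,_|⟨a4,_|⟨a5,_|⟨a6,_|⟨a7,_|⟨a8,_|⟨a9,rest⟩⟩⟩⟩⟩⟩⟩⟩⟩⟩ <;>
    first
      | (exfalso; revert hpre; simp [Pre_decode_ed25519]; done)
      | exact decode_ed25519_eq_alt_cons _ _ _ _ _ _ _ _ _ _ _
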